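-- pv_equiv track=rewrite | github.com/brandongillett/Rat22F-Compiler | lexer.py | is_identifier
-- ===== SOURCE A (Python) =====
-- def is_identifier(token):
--     current_state = 0
--     for char in token:
--         if current_state == 0:
--             if char.isalpha():
--                 current_state = 1
--             else:
--                 return False
--         if current_state == 1:
--             if char.isalpha():
--                 pass
--             elif char.isnumeric():
--                 pass
--             elif char == '_':
--                 pass
--             else:
--                 return False
--     if current_state == 1:
--         return True
--     else:
--         return False
-- ===== SOURCE B (Python) =====
-- def is_identifier(token):
--     return token[:1].isalpha() and token.replace('_', '').isalnum()
-- ===== Notes on version B (the rewrite author's own statement) =====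
-- stated objective: idiomatic
-- what changed: Replaces the explicit DFA loop with two bulk string built-ins: a one-character head slice checked with isalpha, and the whole string checked with isalnum after deleting underscores with replace (exact since per character isalnum = isalpha or isnumeric).
import Mathlib
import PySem

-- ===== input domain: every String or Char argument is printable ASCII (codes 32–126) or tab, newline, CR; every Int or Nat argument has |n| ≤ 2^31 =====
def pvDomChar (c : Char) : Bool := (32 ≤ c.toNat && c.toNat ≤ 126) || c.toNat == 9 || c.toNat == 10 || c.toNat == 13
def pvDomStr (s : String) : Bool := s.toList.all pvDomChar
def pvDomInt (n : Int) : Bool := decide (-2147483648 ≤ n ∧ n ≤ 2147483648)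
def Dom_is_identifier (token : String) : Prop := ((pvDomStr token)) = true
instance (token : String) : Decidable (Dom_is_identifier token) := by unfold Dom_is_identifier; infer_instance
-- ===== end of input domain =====

-- B replaces A's explicit DFA loop with bulk string built-ins: head check via token[:1].isalpha(),
-- body check via token.replace('_','').isalnum() (objective: idiomatic).


-- ===== PORT A =====
-- one loop iteration: 'none' models A's early 'return False', 'some s' the state after the body
def pvStepA (state : Int) (c : Char) : Option Int :=
  match (if state == 0 then (if PySem.Chars.isalpha c then some (1 : Int) else none) else some state) with
  | none => none
  | some s1 =>
    if s1 == 1 then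
      if PySem.Chars.isalpha c then some s1
      else if PySem.Chars.isdigit c then some s1   -- isnumeric = isdigit on the ASCII domain
      else if c == '_' then some s1
      else none
    else some s1

def pvLoopA : Int → List Char → Bool
  | state, [] => state == 1
  | state, c :: cs =>
    match pvStepA state c with
    | none => false
    | some s => pvLoopA s cs

def is_identifier (token : String) : Bool := pvLoopA 0 token.toList

-- ===== PORT B =====
-- token[:1].isalpha() and token.replace('_','').isalnum()
def is_identifier_alt (token : String) : Bool :=
  PySem.Str.strIsalpha (PySem.Str.slice token none (some 1)) &&
  PySem.Str.strIsalnum (PySem.Str.replace token "_" "")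

-- ===== PRECONDITION & SPEC =====
def Spec_is_identifier (token : String) (out : Bool) : Prop := out = is_identifier_alt token
instance (token : String) (out : Bool) : Decidable (Spec_is_identifier token out) := by unfold Spec_is_identifier; infer_instance

-- ===== CLAIM (what is proved, stated in full; the proofs are below) =====
def Claim_equal_is_identifier : Prop := ∀ (token : String), Dom_is_identifier token → Spec_is_identifier token (is_identifier token)

-- ===== LEMMAS AND PROOFS =====
theorem pvLoopA_one (cs : List Char) :
    pvLoopA 1 cs = cs.all (fun d => PySem.Chars.isalpha d || PySem.Chars.isdigit d || d == '_') := by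
  induction cs with
  | nil => rfl
  | cons c cs ih =>
    simp only [pvLoopA, pvStepA, List.all_cons]
    by_cases ha : PySem.Chars.isalpha c <;>
    by_cases hd : PySem.Chars.isdigit c <;>
    by_cases hu : c == '_' <;>
    simp [ha, hd, hu, ih]

-- replace.go with pattern "_" and empty replacement is a filter (for enough fuel)
theorem pvReplaceGo (fuel : Nat) (l acc : List Char) (h : l.length ≤ fuel) :
    PySem.Chars.replace.go ['_'] [] fuel l acc
      = acc.reverse ++ l.filter (fun c => !(c == '_')) := by
  induction fuel generalizing l acc with
  | zero =>
    cases l with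
    | nil => simp [PySem.Chars.replace.go]
    | cons c cs => simp at h
  | succ n ih =>
    cases l with
    | nil => simp [PySem.Chars.replace.go]
    | cons c cs =>
      simp only [List.length_cons] at h
      by_cases hc : c = '_'
      · subst hc
        rw [PySem.Chars.replace.go]
        simp only [List.isPrefixOf, Bool.and_true, beq_self_eq_true, if_pos, List.length_cons,
          List.length_nil, Nat.zero_add, List.drop_succ_cons, List.drop_zero, List.reverse_nil, List.nil_append]
        rw [ih cs acc (by omega)]
        simp
      · rw [PySem.Chars.replace.go]
        have hp : List.isPrefixOf ['_'] (c :: cs) = false := by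
          simp [List.isPrefixOf]
          exact fun h' => hc h'.symm
        rw [hp]
        simp only [Bool.false_eq_true, if_neg, not_false_iff]
        rw [ih cs (c :: acc) (by omega)]
        simp [hc]

theorem pvReplaceUnderscore (l : List Char) :
    PySem.Chars.replace l ['_'] [] = l.filter (fun c => !(c == '_')) := by
  unfold PySem.Chars.replace
  simp only [List.isEmpty_cons, Bool.false_eq_true, if_neg, not_false_iff]
  simpa using pvReplaceGo l.length l [] le_rfl

theorem pvFilterAll (cs : List Char) :
    ((cs.filter (fun c => !(c == '_'))).all PySem.Chars.isalnum)
      = cs.all (fun d => PySem.Chars.isalpha d || PySem.Chars.isdigit d || d == '_') := by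
  induction cs with
  | nil => rfl
  | cons c cs ih =>
    by_cases hu : c == '_'
    · have : c = '_' := by simpa using hu
      subst this
      simp [List.filter, ih]
    · simp [List.filter, hu, PySem.Chars.isalnum, ih]

-- ===== VERDICT (by name: the statement is the Claim_ definition above) =====
theorem is_identifier_spec : Claim_equal_is_identifier := by
  intro token _
  unfold Spec_is_identifier is_identifier is_identifier_alt
  rw [PySem.Str.strIsalpha_eq, PySem.Str.strIsalnum_eq, PySem.Str.toList_slice,
    PySem.Str.toList_replace]
  have hrepl : ("_" : String).toList = ['_'] := rfl
  have hempty : ("" : String).toList = [] := rfl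
  rw [hrepl, hempty, pvReplaceUnderscore]
  rw [PySem.Chars.slice_eq_listSlice, PySem.List.slice_to token.toList (by norm_num : (0:Int) ≤ 1)]
  cases h : token.toList with
  | nil => rfl
  | cons c cs =>
    simp only [pvLoopA, pvStepA, Int.toNat_one, List.take_succ_cons, List.take_zero]
    by_cases ha : PySem.Chars.isalpha c
    · have hc : (c == '_') = false := by
        have : PySem.Chars.isalpha '_' = false := by decide
        by_contra hcc
        simp only [Bool.not_eq_false, beq_iff_eq] at hcc
        rw [hcc] at ha; simp [this] at ha
      simp only [List.filter, hc, Bool.not_false]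
      simp [PySem.Chars.strIsalpha, PySem.Chars.strIsalnum, ha, pvLoopA_one,
        PySem.Chars.isalnum, pvFilterAll cs]
    · simp [PySem.Chars.strIsalpha, ha]
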